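-- pv_equiv track=rewrite | github.com/musicalml/muml | backend/midi/miscs.py | times_to_diff
-- ===== SOURCE A (Python) =====
-- from copy import deepcopy
--
-- def times_to_diff(raw_list):
--     new_raw_list = []
--     last = 0
--     for x in raw_list:
--         t = deepcopy(x)
--         t[3] -= last
--         last = x[3]
--         new_raw_list.append(t)
--     return new_raw_list
-- ===== SOURCE B (Python) =====
-- from copy import deepcopy
--
-- def times_to_diff(raw_list):
--     out = []
--     for i in range(len(raw_list) - 1, -1, -1):
--         t = deepcopy(raw_list[i])
--         if i > 0:
--             t[3] -= raw_list[i - 1][3]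
--         out.append(t)
--     out.reverse()
--     return out
-- ===== Notes on version B (the rewrite author's own statement) =====
-- stated objective: alternative
-- what changed: Instead of a forward loop threading a running 'last' accumulator, B builds the result back-to-front with a descending index loop that subtracts the predecessor element looked up by index (no carried state, a branch replaces the accumulator's initial 0) and reverses at the end.
import Mathlib
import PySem

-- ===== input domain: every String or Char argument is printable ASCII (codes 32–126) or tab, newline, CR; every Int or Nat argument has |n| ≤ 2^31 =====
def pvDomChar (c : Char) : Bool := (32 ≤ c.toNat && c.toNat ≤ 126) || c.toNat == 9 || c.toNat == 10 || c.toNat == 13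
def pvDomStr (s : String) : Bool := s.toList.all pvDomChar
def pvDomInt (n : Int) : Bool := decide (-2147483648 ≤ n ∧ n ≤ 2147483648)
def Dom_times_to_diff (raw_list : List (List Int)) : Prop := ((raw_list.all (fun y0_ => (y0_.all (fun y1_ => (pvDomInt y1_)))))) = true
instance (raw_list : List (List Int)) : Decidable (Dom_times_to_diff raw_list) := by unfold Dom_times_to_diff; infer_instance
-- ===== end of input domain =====

-- B drops A's running `last` accumulator: it builds the result back-to-front with a descending
-- index loop that looks up each element's predecessor by index (a branch handles i = 0), then
-- reverses — an alternative stateless decomposition, same cost.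

-- ===== PORT A =====
-- A: forward loop carrying (new_raw_list, last); t = deepcopy(x); t[3] -= last; last = x[3]
def times_to_diff (raw_list : List (List Int)) : List (List Int) :=
  (raw_list.foldl
    (fun (st : List (List Int) × Int) x =>
      let t := PySem.List.pySetD x 3 (PySem.List.pyGetD x 3 0 - st.2)
      (st.1 ++ [t], PySem.List.pyGetD x 3 0))
    (([] : List (List Int)), (0 : Int))).1

-- ===== PORT B =====
-- B: for i in range(len(raw_list)-1, -1, -1): t = deepcopy(raw_list[i]);
--    if i > 0: t[3] -= raw_list[i-1][3]; out.append(t); then out.reverse()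
def times_to_diff_alt (raw_list : List (List Int)) : List (List Int) :=
  ((PySem.List.pyRange ((raw_list.length : Int) - 1) (-1) (-1)).foldl
    (fun (out : List (List Int)) i =>
      let t0 := PySem.List.pyGetD raw_list i []
      let t :=
        if 0 < i then
          PySem.List.pySetD t0 3
            (PySem.List.pyGetD t0 3 0 - PySem.List.pyGetD (PySem.List.pyGetD raw_list (i - 1) []) 3 0)
        else t0
      out ++ [t])
    []).reverse

-- ===== PRECONDITION & SPEC =====
-- Pre_ excludes exactly the inputs where Python A raises IndexError: an element shorter than 4.
def Pre_times_to_diff (raw_list : List (List Int)) : Prop :=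
  ∀ x ∈ raw_list, 4 ≤ x.length
instance (raw_list : List (List Int)) : Decidable (Pre_times_to_diff raw_list) := by
  unfold Pre_times_to_diff; infer_instance
def pvWitness_times_to_diff : List (List Int) := [[1, 2, 3, 10], [4, 5, 6, 25]]
def Spec_times_to_diff (raw_list : List (List Int)) (out : List (List Int)) : Prop := out = times_to_diff_alt raw_list
instance (raw_list : List (List Int)) (out : List (List Int)) : Decidable (Spec_times_to_diff raw_list out) := by unfold Spec_times_to_diff; infer_instance

-- ===== CLAIM =====
def Claim_equal_times_to_diff : Prop := ∀ (raw_list : List (List Int)), Dom_times_to_diff raw_list → Pre_times_to_diff raw_list → Spec_times_to_diff raw_list (times_to_diff raw_list)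

-- ===== LEMMAS AND PROOFS =====

-- the body of B's loop, as a function of the index
def pvDiffAt (rl : List (List Int)) (i : Int) : List Int :=
  let t0 := PySem.List.pyGetD rl i []
  if 0 < i then
    PySem.List.pySetD t0 3
      (PySem.List.pyGetD t0 3 0 - PySem.List.pyGetD (PySem.List.pyGetD rl (i - 1) []) 3 0)
  else t0

-- structural form of A's loop, the carried `last` made explicit
def pvGoA (rl : List (List Int)) (last : Int) : List (List Int) :=
  match rl with
  | [] => []
  | x :: xs =>
      PySem.List.pySetD x 3 (PySem.List.pyGetD x 3 0 - last) :: pvGoA xs (PySem.List.pyGetD x 3 0)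

theorem pv_foldA (rl : List (List Int)) :
    ∀ (acc : List (List Int)) (last : Int),
      (rl.foldl
        (fun (st : List (List Int) × Int) x =>
          (st.1 ++ [PySem.List.pySetD x 3 (PySem.List.pyGetD x 3 0 - st.2)],
           PySem.List.pyGetD x 3 0))
        (acc, last)).1 = acc ++ pvGoA rl last := by
  induction rl with
  | nil => intro acc last; simp [pvGoA]
  | cons x xs ih => intro acc last; simp [pvGoA, ih]

theorem pv_getD_cons (a : List Int) (rest : List (List Int)) (k : Nat) :
    PySem.List.pyGetD (a :: rest) ((k : Int) + 1) ([] : List Int)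
      = PySem.List.pyGetD rest (k : Int) [] := by
  have h : (k : Int) + 1 = ((k + 1 : Nat) : Int) := by push_cast; ring
  rw [h, PySem.List.pyGetD_natCast, PySem.List.pyGetD_natCast]
  simp [List.getD]

theorem pv_getD_three (x : List Int) :
    PySem.List.pyGetD x (3 : Int) (0 : Int) = x.getD 3 0 := by
  rw [show (3 : Int) = ((3 : Nat) : Int) from by norm_num, PySem.List.pyGetD_natCast]

theorem pv_setD_three (x : List Int) (v : Int) :
    PySem.List.pySetD x (3 : Int) v = x.set 3 v := by
  rw [show (3 : Int) = ((3 : Nat) : Int) from by norm_num, PySem.List.pySetD_natCast]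

-- deepcopy-then-subtract-0 at the head is the identity (A writes x[3] - 0 back into slot 3)
theorem pv_set_noop (x : List Int) (h : 4 ≤ x.length) :
    PySem.List.pySetD x 3 (PySem.List.pyGetD x 3 0 - 0) = x := by
  rw [sub_zero, pv_getD_three, pv_setD_three, List.getD_eq_getElem x 0 (by omega)]
  exact List.set_getElem_self (by omega)

-- index shift: with a positive index, pvDiffAt on a cons looks only at the tail (shifted)
theorem pv_diffAt_cons_shift (a : List Int) (rest : List (List Int)) (k : Nat) :
    pvDiffAt (a :: rest) ((k : Int) + 1 + 1) = pvDiffAt rest ((k : Int) + 1) := by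
  have h1 := pv_getD_cons a rest (k + 1)
  have h0 := pv_getD_cons a rest k
  push_cast at h1
  have e1 : (k : Int) + 1 + 1 - 1 = (k : Int) + 1 := by ring
  have e2 : (k : Int) + 1 - 1 = (k : Int) := by ring
  have hp1 : (0 : Int) < (k : Int) + 1 + 1 := by positivity
  have hp2 : (0 : Int) < (k : Int) + 1 := by positivity
  simp only [pvDiffAt, e1, e2, h1, h0, if_pos hp1, if_pos hp2]

-- tail of the indexed map equals pvGoA seeded with the preceding element's slot-3 value
theorem pv_tail (xs : List (List Int)) :
    ∀ (p : List Int),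
      (List.range xs.length).map (fun (k : Nat) => pvDiffAt (p :: xs) ((k : Int) + 1))
        = pvGoA xs (PySem.List.pyGetD p 3 0) := by
  induction xs with
  | nil => intro p; simp [pvGoA]
  | cons y ys ih =>
    intro p
    rw [List.length_cons, List.range_succ_eq_map, List.map_cons, List.map_map]
    have hd : pvDiffAt (p :: y :: ys) (((0 : Nat) : Int) + 1)
        = PySem.List.pySetD y 3 (PySem.List.pyGetD y 3 0 - PySem.List.pyGetD p 3 0) := by
      have g1 : PySem.List.pyGetD (p :: y :: ys) (((0 : Nat) : Int) + 1) ([] : List Int) = y := by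
        rw [pv_getD_cons p (y :: ys) 0]
        simp [PySem.List.pyGetD_zero_cons]
      have g0 : PySem.List.pyGetD (p :: y :: ys) (((0 : Nat) : Int) + 1 - 1) ([] : List Int) = p := by
        norm_num [PySem.List.pyGetD_zero_cons]
      simp only [pvDiffAt, g1, g0, if_pos (by norm_num : (0 : Int) < ((0 : Nat) : Int) + 1)]
    have htl : ∀ k ∈ List.range ys.length,
        ((fun (k : Nat) => pvDiffAt (p :: y :: ys) ((k : Int) + 1)) ∘ Nat.succ) k
          = (fun (k : Nat) => pvDiffAt (y :: ys) ((k : Int) + 1)) k := by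
      intro k _
      simp only [Function.comp]
      have ec : ((Nat.succ k : Nat) : Int) + 1 = (k : Int) + 1 + 1 := by push_cast; ring
      rw [ec]
      exact pv_diffAt_cons_shift p (y :: ys) k
    rw [List.map_congr_left htl, ih y, hd]
    rfl

-- the indexed-map characterisation agrees with A's structural loop
theorem pv_map_eq_goA (rl : List (List Int)) (hp : ∀ x ∈ rl, 4 ≤ x.length) :
    (List.range rl.length).map (fun (k : Nat) => pvDiffAt rl (k : Int)) = pvGoA rl 0 := by
  cases rl with
  | nil => simp [pvGoA]
  | cons x xs =>
    rw [List.length_cons, List.range_succ_eq_map, List.map_cons, List.map_map]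
    have hd : pvDiffAt (x :: xs) (((0 : Nat) : Int)) = x := by
      simp [pvDiffAt, PySem.List.pyGetD_zero_cons]
    have htl : ∀ k ∈ List.range xs.length,
        ((fun (k : Nat) => pvDiffAt (x :: xs) (k : Int)) ∘ Nat.succ) k
          = (fun (k : Nat) => pvDiffAt (x :: xs) ((k : Int) + 1)) k := by
      intro k _
      simp only [Function.comp]
      have ec : ((Nat.succ k : Nat) : Int) = (k : Int) + 1 := by push_cast; ring
      rw [ec]
    rw [List.map_congr_left htl, pv_tail xs x, hd]
    show x :: pvGoA xs (PySem.List.pyGetD x 3 0)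
        = PySem.List.pySetD x 3 (PySem.List.pyGetD x 3 0 - 0) :: pvGoA xs (PySem.List.pyGetD x 3 0)
    rw [pv_set_noop x (hp x List.mem_cons_self)]

-- B's descending fold is the reverse of the indexed map over the ascending range
theorem pv_B_eq_map (rl : List (List Int)) :
    times_to_diff_alt rl = (List.range rl.length).map (fun (k : Nat) => pvDiffAt rl (k : Int)) := by
  unfold times_to_diff_alt
  have hr : PySem.List.pyRange ((rl.length : Int) - 1) (-1) (-1)
      = (PySem.List.pyRange 0 (rl.length : Int) 1).reverse := by
    rw [PySem.List.pyRange_neg_one_eq_reverse]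
    norm_num
  have hrange : PySem.List.pyRange 0 (rl.length : Int) 1
      = (List.range rl.length).map (fun (k : Nat) => (k : Int)) := by
    rw [PySem.List.pyRange_one]
    norm_num
  rw [hr, hrange, show (fun (out : List (List Int)) (i : Int) =>
        out ++ [if 0 < i then
          PySem.List.pySetD (PySem.List.pyGetD rl i []) 3
            (PySem.List.pyGetD (PySem.List.pyGetD rl i []) 3 0
              - PySem.List.pyGetD (PySem.List.pyGetD rl (i - 1) []) 3 0)
        else PySem.List.pyGetD rl i []])
      = (fun (out : List (List Int)) (i : Int) => out ++ [pvDiffAt rl i]) from rfl,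
    PySem.List.foldl_append_singleton_eq_map]
  simp [List.map_reverse, List.map_map]

-- ===== VERDICT =====
theorem times_to_diff_spec : Claim_equal_times_to_diff := by
  intro rl _ hp
  unfold Spec_times_to_diff
  rw [pv_B_eq_map rl, pv_map_eq_goA rl hp]
  unfold times_to_diff
  rw [pv_foldA rl [] 0]
  simp
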